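-- pv_equiv track=rewrite | github.com/ayushv/entropy | minimax.py | scoreHelp
-- ===== SOURCE A (Python) =====
-- def scoreHelp(row):
-- 	MAX = len(row)
-- 	isOk = lambda x: True if x >= 0 and x < MAX and row[x] != '-' else False
-- 	score = 0
-- 	for ind in range(1, MAX):
-- 		# epicenter b/w ind-1 and ind
-- 		length = 0
-- 		scoreX = 0
-- 		right = ind
-- 		left = ind - 1
-- 		while isOk(right) and isOk(left) and row[left] == row[right]:
-- 			scoreX += (length+2); length += 2; right += 1; left -= 1
-- 		score += scoreX
--
-- 		# epicenter at ind
-- 		length = 1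
-- 		scoreX = 0
-- 		right = ind + 1
-- 		left = ind - 1
-- 		while isOk(right) and isOk(left) and row[left] == row[right]:
-- 			scoreX += (length + 2); length += 2; right += 1; left -= 1
-- 		score += scoreX
-- 	return score
-- ===== SOURCE B (Python) =====
-- def scoreHelp(row):
--     # Enumerate every substring of length >= 2 and add its length when it is a
--     # palindrome whose first half contains no '-' (a '-' may only sit at the
--     # exact middle of an odd-length palindrome).
--     total = 0
--     n = len(row)
--     for r in range(n):
--         for l in range(r):
--             t = row[l:r + 1]
--             if t == t[::-1] and '-' not in t[:len(t) // 2]: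
--                 total += len(t)
--     return total
-- ===== Notes on version B (the rewrite author's own statement) =====
-- stated objective: alternative
-- what changed: A expands outward around each of the 2n-1 centers with incremental while-loops; B instead enumerates every substring of length >= 2 and adds its length when it equals its own reverse and its first half contains no '-', trading center expansion for brute-force substring enumeration with a reversal check.
import Mathlib
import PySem

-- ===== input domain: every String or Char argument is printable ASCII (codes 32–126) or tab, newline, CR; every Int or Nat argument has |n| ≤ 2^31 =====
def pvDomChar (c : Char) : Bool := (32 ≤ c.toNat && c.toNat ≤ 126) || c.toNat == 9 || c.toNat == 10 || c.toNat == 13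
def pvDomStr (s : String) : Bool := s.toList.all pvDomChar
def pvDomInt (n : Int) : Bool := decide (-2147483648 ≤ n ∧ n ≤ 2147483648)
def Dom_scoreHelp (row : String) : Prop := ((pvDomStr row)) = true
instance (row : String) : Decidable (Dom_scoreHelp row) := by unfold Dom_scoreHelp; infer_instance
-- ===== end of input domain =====

-- B replaces A's expansion around each center by enumeration of all substrings of
-- length ≥ 2 with a reversal palindrome check (objective: alternative algorithm).

-- ===== PORT A =====
-- the while loop 'while isOk(right) and isOk(left) and row[left] == row[right]: …'
-- (the lambda isOk x = x >= 0 and x < MAX and row[x] != '-' is inlined in the guard)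
def pvALoop (chars : List Char) (MAX : Int) (scoreX length right left : Int) : Int :=
  if h : (0 ≤ right ∧ right < MAX ∧ PySem.List.pyGet? chars right ≠ some '-') ∧
         (0 ≤ left ∧ left < MAX ∧ PySem.List.pyGet? chars left ≠ some '-') ∧
         PySem.List.pyGet? chars left = PySem.List.pyGet? chars right then
    pvALoop chars MAX (scoreX + (length + 2)) (length + 2) (right + 1) (left - 1)
  else scoreX
termination_by (MAX - right).toNat
decreasing_by
  have := h.1.2.1
  omega

def scoreHelp (row : String) : Int :=
  let chars := row.toList
  let MAX : Int := (chars.length : Int)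
  (PySem.List.pyRange 1 MAX 1).foldl
    (fun score ind =>
      -- epicenter b/w ind-1 and ind
      let score := score + pvALoop chars MAX 0 0 ind (ind - 1)
      -- epicenter at ind
      score + pvALoop chars MAX 0 1 (ind + 1) (ind - 1)) 0

-- ===== PORT B =====
def scoreHelp_alt (row : String) : Int :=
  let chars := row.toList
  let n : Int := (chars.length : Int)
  (PySem.List.pyRange 0 n 1).foldl
    (fun total r =>
      (PySem.List.pyRange 0 r 1).foldl
        (fun total l =>
          let t := PySem.List.slice chars (some l) (some (r + 1))
          if t.reverse = t ∧ '-' ∉ t.take (t.length / 2) then total + (t.length : Int)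
          else total)
        total)
    0

-- ===== PRECONDITION & SPEC =====
def Spec_scoreHelp (row : String) (out : Int) : Prop := out = scoreHelp_alt row
instance (row : String) (out : Int) : Decidable (Spec_scoreHelp row out) := by unfold Spec_scoreHelp; infer_instance

-- ===== CLAIM (what is proved, stated in full; the proofs are below) =====
def Claim_equal_scoreHelp : Prop := ∀ (row : String), Dom_scoreHelp row → Spec_scoreHelp row (scoreHelp row)

-- ===== LEMMAS AND PROOFS =====

-- B's radius of matching expansion steps, used only by the proofs below
def pvRad (chars : List Char) (n : Int) (k left right : Int) : Int :=
  if h : 0 ≤ left ∧ right < n ∧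
         PySem.List.pyGet? chars left ≠ some '-' ∧
         PySem.List.pyGet? chars right ≠ some '-' ∧
         PySem.List.pyGet? chars left = PySem.List.pyGet? chars right then
    pvRad chars n (k + 1) (left - 1) (right + 1)
  else k
termination_by (n - right).toNat
decreasing_by
  have := h.2.1
  omega

-- the one-step matching condition at positions (l, r)
def pvCond (chars : List Char) (n l r : Int) : Prop :=
  0 ≤ l ∧ r < n ∧
  PySem.List.pyGet? chars l ≠ some '-' ∧
  PySem.List.pyGet? chars r ≠ some '-' ∧
  PySem.List.pyGet? chars l = PySem.List.pyGet? chars r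

-- (l, r) delimit a scoring palindrome: in range, length ≥ 2, all symmetric pairs match
def pvGood (chars : List Char) (n l r : Int) : Prop :=
  0 ≤ l ∧ l < r ∧ r < n ∧
  ∀ i : Int, 0 ≤ i → 2 * i + 2 ≤ r - l + 1 → pvCond chars n (l + i) (r - i)

lemma pvRad_shift (chars : List Char) (n : Int) (k left right : Int) :
    pvRad chars n k left right = k + pvRad chars n 0 left right := by
  suffices h : ∀ (m : Nat) (k left right : Int), (n - right).toNat ≤ m →
      pvRad chars n k left right = k + pvRad chars n 0 left right from
    h (n - right).toNat k left right le_rfl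
  intro m
  induction m with
  | zero =>
    intro k l r hm
    have hg : ¬(0 ≤ l ∧ r < n ∧ PySem.List.pyGet? chars l ≠ some '-' ∧
        PySem.List.pyGet? chars r ≠ some '-' ∧
        PySem.List.pyGet? chars l = PySem.List.pyGet? chars r) := by
      intro h; have := h.2.1; omega
    conv_lhs => rw [pvRad]
    conv_rhs => rw [pvRad]
    simp only [dif_neg hg]
    ring
  | succ m ih =>
    intro k l r hm
    by_cases hg : 0 ≤ l ∧ r < n ∧ PySem.List.pyGet? chars l ≠ some '-' ∧
        PySem.List.pyGet? chars r ≠ some '-' ∧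
        PySem.List.pyGet? chars l = PySem.List.pyGet? chars r
    · conv_lhs => rw [pvRad]
      conv_rhs => rw [pvRad]
      simp only [dif_pos hg]
      have hr := hg.2.1
      rw [ih (k + 1) (l - 1) (r + 1) (by omega), ih (0 + 1) (l - 1) (r + 1) (by omega)]
      ring
    · conv_lhs => rw [pvRad]
      conv_rhs => rw [pvRad]
      simp only [dif_neg hg]
      ring

lemma pvRad_nonneg (chars : List Char) (n l r : Int) : 0 ≤ pvRad chars n 0 l r := by
  suffices h : ∀ (m : Nat) (l r : Int), (n - r).toNat ≤ m → 0 ≤ pvRad chars n 0 l r from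
    h (n - r).toNat l r le_rfl
  intro m
  induction m with
  | zero =>
    intro l r hm
    rw [pvRad]
    split
    · next hg => exact absurd hg.2.1 (by omega)
    · exact le_rfl
  | succ m ih =>
    intro l r hm
    rw [pvRad]
    split
    · next hg =>
      rw [pvRad_shift]
      have := ih (l - 1) (r + 1) (by have := hg.2.1; omega)
      omega
    · exact le_rfl

lemma pvRad_le (chars : List Char) (n l r : Int) (h : r ≤ n) :
    pvRad chars n 0 l r ≤ n - r := by
  suffices hs : ∀ (m : Nat) (l r : Int), (n - r).toNat ≤ m → r ≤ n →
      pvRad chars n 0 l r ≤ n - r from hs (n - r).toNat l r le_rfl h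
  intro m
  induction m with
  | zero =>
    intro l r hm hr
    rw [pvRad]
    split
    · next hg => exact absurd hg.2.1 (by omega)
    · omega
  | succ m ih =>
    intro l r hm hr
    rw [pvRad]
    split
    · next hg =>
      rw [pvRad_shift]
      have := ih (l - 1) (r + 1) (by have := hg.2.1; omega) (by have := hg.2.1; omega)
      omega
    · omega

lemma pvRad_pos_step (chars : List Char) (n l r : Int) (h : pvCond chars n l r) :
    pvRad chars n 0 l r = 1 + pvRad chars n 0 (l - 1) (r + 1) := by
  unfold pvCond at h
  conv_lhs => rw [pvRad]
  rw [dif_pos h, pvRad_shift]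
  ring

lemma pvRad_zero_step (chars : List Char) (n l r : Int) (h : ¬ pvCond chars n l r) :
    pvRad chars n 0 l r = 0 := by
  unfold pvCond at h
  conv_lhs => rw [pvRad]
  rw [dif_neg h]

lemma pvRad_iff (chars : List Char) (n : Int) (j : Nat) :
    ∀ l r : Int, ((j : Int) < pvRad chars n 0 l r ↔
      ∀ i : Nat, i ≤ j → pvCond chars n (l - i) (r + i)) := by
  induction j with
  | zero =>
    intro l r
    by_cases hc : pvCond chars n l r
    · rw [pvRad_pos_step chars n l r hc]
      have := pvRad_nonneg chars n (l - 1) (r + 1)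
      constructor
      · intro _ i hi
        interval_cases i
        simpa using hc
      · intro _; omega
    · rw [pvRad_zero_step chars n l r hc]
      constructor
      · intro h; omega
      · intro h
        have := h 0 le_rfl
        simp at this
        exact absurd this hc
  | succ j ih =>
    intro l r
    by_cases hc : pvCond chars n l r
    · rw [pvRad_pos_step chars n l r hc]
      have hmain : ((j : Int) < pvRad chars n 0 (l - 1) (r + 1)) ↔
          ∀ i : Nat, i ≤ j + 1 → pvCond chars n (l - i) (r + i) := by
        rw [ih (l - 1) (r + 1)]
        constructor
        · intro h i hi
          match i with
          | 0 => simpa using hc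
          | Nat.succ i' =>
            have := h i' (by omega)
            have e1 : l - 1 - (i' : Int) = l - ((i' + 1 : Nat) : Int) := by push_cast; ring
            have e2 : r + 1 + (i' : Int) = r + ((i' + 1 : Nat) : Int) := by push_cast; ring
            rwa [e1, e2] at this
        · intro h i hi
          have := h (i + 1) (by omega)
          have e1 : l - ((i + 1 : Nat) : Int) = l - 1 - (i : Int) := by push_cast; ring
          have e2 : r + ((i + 1 : Nat) : Int) = r + 1 + (i : Int) := by push_cast; ring
          rwa [e1, e2] at this
      constructor
      · intro h
        exact hmain.mp (by push_cast at h ⊢; omega)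
      · intro h
        have := hmain.mpr h
        push_cast at this ⊢
        omega
    · rw [pvRad_zero_step chars n l r hc]
      constructor
      · intro h
        have : ((j + 1 : Nat) : Int) ≥ 0 := by positivity
        omega
      · intro h
        have := h 0 (by omega)
        simp at this
        exact absurd this hc

lemma pvRad_ge_iff (chars : List Char) (n l r k : Int) (hk : 1 ≤ k) :
    k ≤ pvRad chars n 0 l r ↔ ∀ i : Int, 0 ≤ i → i < k → pvCond chars n (l - i) (r + i) := by
  have hj : (((k - 1).toNat : Int)) = k - 1 := by omega
  rw [show (k ≤ pvRad chars n 0 l r) ↔ (((k - 1).toNat : Int) < pvRad chars n 0 l r) by omega]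
  rw [pvRad_iff chars n (k - 1).toNat l r]
  constructor
  · intro h i h0 hik
    have := h i.toNat (by omega)
    have e1 : l - (i.toNat : Int) = l - i := by omega
    have e2 : r + (i.toNat : Int) = r + i := by omega
    rwa [e1, e2] at this
  · intro h i hi
    exact h (i : Int) (by omega) (by omega)

lemma pvEven_link (chars : List Char) (n ind k : Int) (hk : 1 ≤ k) :
    k ≤ pvRad chars n 0 (ind - 1) ind ↔ pvGood chars n (ind - k) (ind + k - 1) := by
  rw [pvRad_ge_iff chars n (ind - 1) ind k hk]
  unfold pvGood
  constructor
  · intro h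
    have hend := h (k - 1) (by omega) (by omega)
    have e1 : ind - 1 - (k - 1) = ind - k := by ring
    have e2 : ind + (k - 1) = ind + k - 1 := by ring
    rw [e1, e2] at hend
    refine ⟨hend.1, by omega, hend.2.1, ?_⟩
    intro i h0 hb
    have := h (k - 1 - i) (by omega) (by omega)
    have e3 : ind - 1 - (k - 1 - i) = ind - k + i := by ring
    have e4 : ind + (k - 1 - i) = ind + k - 1 - i := by ring
    rwa [e3, e4] at this
  · rintro ⟨h0l, hlr, hrn, hall⟩ i h0 hik
    have := hall (k - 1 - i) (by omega) (by omega)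
    have e3 : ind - k + (k - 1 - i) = ind - 1 - i := by ring
    have e4 : ind + k - 1 - (k - 1 - i) = ind + i := by ring
    rwa [e3, e4] at this

lemma pvOdd_link (chars : List Char) (n ind k : Int) (hk : 1 ≤ k) :
    k ≤ pvRad chars n 0 (ind - 1) (ind + 1) ↔ pvGood chars n (ind - k) (ind + k) := by
  rw [pvRad_ge_iff chars n (ind - 1) (ind + 1) k hk]
  unfold pvGood
  constructor
  · intro h
    have hend := h (k - 1) (by omega) (by omega)
    have e1 : ind - 1 - (k - 1) = ind - k := by ring
    have e2 : ind + 1 + (k - 1) = ind + k := by ring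
    rw [e1, e2] at hend
    refine ⟨hend.1, by omega, hend.2.1, ?_⟩
    intro i h0 hb
    have := h (k - 1 - i) (by omega) (by omega)
    have e3 : ind - 1 - (k - 1 - i) = ind - k + i := by ring
    have e4 : ind + 1 + (k - 1 - i) = ind + k - i := by ring
    rwa [e3, e4] at this
  · rintro ⟨h0l, hlr, hrn, hall⟩ i h0 hik
    have := hall (k - 1 - i) (by omega) (by omega)
    have e3 : ind - k + (k - 1 - i) = ind - 1 - i := by ring
    have e4 : ind + k - (k - 1 - i) = ind + 1 + i := by ring
    rwa [e3, e4] at this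

lemma pvSlice_toNat' (chars : List Char) (l r : Nat) :
    PySem.List.slice chars (some (l : Int)) (some ((r : Int) + 1)) =
      (chars.drop l).take (r + 1 - l) := by
  rw [PySem.List.slice_toNat chars (a := (l : Int)) (b := (r : Int) + 1) (by positivity) (by positivity)]
  have ht1 : ((l : Int)).toNat = l := by omega
  have ht2 : (((r : Int) + 1)).toNat = r + 1 := by omega
  rw [ht1, ht2]

lemma pvSlice_len (chars : List Char) (l r : Nat) (hlr : l ≤ r) (hr : r < chars.length) :
    (PySem.List.slice chars (some (l : Int)) (some ((r : Int) + 1))).length = r + 1 - l := by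
  rw [pvSlice_toNat']
  simp only [List.length_take, List.length_drop]
  omega

lemma pvCond_nat (chars : List Char) (a b : Nat) (ha : a < chars.length) (hb : b < chars.length) :
    pvCond chars (chars.length : Int) (a : Int) (b : Int) ↔
      (chars[a] ≠ '-' ∧ chars[b] ≠ '-' ∧ chars[a] = chars[b]) := by
  unfold pvCond
  rw [PySem.List.pyGet?_natCast, PySem.List.pyGet?_natCast,
    List.getElem?_eq_getElem ha, List.getElem?_eq_getElem hb]
  constructor
  · rintro ⟨-, -, h1, h2, h3⟩
    exact ⟨by simpa using h1, by simpa using h2, by simpa using h3⟩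
  · rintro ⟨h1, h2, h3⟩
    exact ⟨by positivity, by exact_mod_cast hb, by simpa using h1, by simpa using h2,
      by simpa using h3⟩

lemma pvPal_link (chars : List Char) (l r : Nat) (hlr : l < r) (hr : r < chars.length) :
    ((PySem.List.slice chars (some (l : Int)) (some ((r : Int) + 1))).reverse =
        PySem.List.slice chars (some (l : Int)) (some ((r : Int) + 1)) ∧
      '-' ∉ (PySem.List.slice chars (some (l : Int)) (some ((r : Int) + 1))).take
          ((PySem.List.slice chars (some (l : Int)) (some ((r : Int) + 1))).length / 2)) ↔
    pvGood chars (chars.length : Int) (l : Int) (r : Int) := by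
  rw [pvSlice_toNat']
  set t := (chars.drop l).take (r + 1 - l) with htdef
  have hm : t.length = r + 1 - l := by
    simp only [htdef, List.length_take, List.length_drop]; omega
  have hget : ∀ i (hi : i < t.length), t[i] = chars[l + i]'(by rw [hm] at hi; omega) := by
    intro i hi
    simp only [htdef, List.getElem_take, List.getElem_drop]
  have hpal : (t.reverse = t) ↔
      ∀ i (hi : i < t.length), t[t.length - 1 - i]'(by omega) = t[i] := by
    constructor
    · intro h i hi
      have h2 : t.reverse[i]'(by simpa using hi) = t[i] := by simp only [h]
      rwa [List.getElem_reverse] at h2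
    · intro h
      apply List.ext_getElem (by simp)
      intro i h1 h2
      rw [List.getElem_reverse]
      exact h i h2
  have hhalf : ('-' ∉ t.take (t.length / 2)) ↔
      ∀ i (hi : i < t.length / 2), t[i]'(by omega) ≠ '-' := by
    simp only [List.mem_iff_getElem, not_exists]
    constructor
    · intro h i hi
      have := h i
      simp only [List.getElem_take, List.length_take] at this
      exact fun he => this (by omega) he
    · intro h i hi
      simp only [List.length_take] at hi
      simp only [List.getElem_take]
      exact h i (by omega)
  rw [hpal, hhalf]
  unfold pvGood
  constructor
  · rintro ⟨hp, hh⟩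
    refine ⟨by positivity, by exact_mod_cast hlr, by exact_mod_cast hr, ?_⟩
    intro i h0 hb
    have hi2 : 2 * i.toNat + 2 ≤ r + 1 - l := by omega
    have e1 : (l : Int) + i = ((l + i.toNat : Nat) : Int) := by omega
    have e2 : (r : Int) - i = ((r - i.toNat : Nat) : Int) := by omega
    rw [e1, e2, pvCond_nat chars (l + i.toNat) (r - i.toNat) (by omega) (by omega)]
    have hiltm : i.toNat < t.length := by omega
    have hihalf : i.toNat < t.length / 2 := by omega
    have hne := hh i.toNat hihalf
    have hpe := hp i.toNat hiltm
    have hA := hget i.toNat hiltm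
    have hB := hget (t.length - 1 - i.toNat) (by omega)
    have eidx : l + (t.length - 1 - i.toNat) = r - i.toNat := by omega
    simp only [eidx] at hB
    rw [hA] at hne hpe
    rw [hB] at hpe
    exact ⟨hne, by rw [hpe]; exact hne, hpe.symm⟩
  · rintro ⟨-, -, -, hall⟩
    have hext : ∀ j : Nat, 2 * j + 2 ≤ r + 1 - l →
        ∀ (hj1 : l + j < chars.length) (hj2 : r - j < chars.length),
        chars[l + j]'hj1 ≠ '-' ∧ chars[r - j]'hj2 ≠ '-' ∧
          chars[l + j]'hj1 = chars[r - j]'hj2 := by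
      intro j hj hj1 hj2
      have := hall (j : Int) (by positivity) (by omega)
      have e1 : (l : Int) + (j : Int) = ((l + j : Nat) : Int) := by omega
      have e2 : (r : Int) - (j : Int) = ((r - j : Nat) : Int) := by omega
      rw [e1, e2, pvCond_nat chars (l + j) (r - j) hj1 hj2] at this
      exact this
    constructor
    · intro i hi
      by_cases hcase : 2 * i + 2 ≤ r + 1 - l
      · have h3 := (hext i hcase (by omega) (by omega)).2.2
        rw [hget i hi, hget (t.length - 1 - i) (by omega)]
        have eidx : l + (t.length - 1 - i) = r - i := by omega
        simp only [eidx]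
        exact h3.symm
      · by_cases hmid : t.length - 1 - i = i
        · simp only [hmid]
        · have hj : 2 * (t.length - 1 - i) + 2 ≤ r + 1 - l := by omega
          have h3 := (hext (t.length - 1 - i) hj (by omega) (by omega)).2.2
          rw [hget i hi, hget (t.length - 1 - i) (by omega)]
          have eidx : r - (t.length - 1 - i) = l + i := by omega
          simp only [eidx] at h3
          exact h3
    · intro i hi
      have h1 := (hext i (by omega) (by omega) (by omega)).1
      rw [hget i (by omega)]
      exact h1

-- A's while loop in closed form: radius p contributes p*L + p*(p+1)
lemma pvGuard_iff (chars : List Char) (MAX l r : Int) (hlt : l < r) :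
    ((0 ≤ r ∧ r < MAX ∧ PySem.List.pyGet? chars r ≠ some '-') ∧
        (0 ≤ l ∧ l < MAX ∧ PySem.List.pyGet? chars l ≠ some '-') ∧
        PySem.List.pyGet? chars l = PySem.List.pyGet? chars r) ↔
      pvCond chars MAX l r := by
  unfold pvCond
  constructor
  · rintro ⟨⟨_, hrM, hrc⟩, ⟨hl0, _, hlc⟩, heq⟩
    exact ⟨hl0, hrM, hlc, hrc, heq⟩
  · rintro ⟨hl0, hrM, hlc, hrc, heq⟩
    exact ⟨⟨by omega, hrM, hrc⟩, ⟨hl0, by omega, hlc⟩, heq⟩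

lemma pvALoop_eq (chars : List Char) (MAX : Int) (s L right left : Int)
    (hlt : left < right) :
    pvALoop chars MAX s L right left =
      s + (pvRad chars MAX 0 left right) * L
        + (pvRad chars MAX 0 left right) * ((pvRad chars MAX 0 left right) + 1) := by
  suffices h : ∀ (m : Nat) (s L right left : Int), left < right → (MAX - right).toNat ≤ m →
      pvALoop chars MAX s L right left =
        s + (pvRad chars MAX 0 left right) * L
          + (pvRad chars MAX 0 left right) * ((pvRad chars MAX 0 left right) + 1) from
    h (MAX - right).toNat s L right left hlt le_rfl
  intro m
  induction m with
  | zero =>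
    intro s L r l hlt2 hm
    have hg : ¬ pvCond chars MAX l r := by
      intro h; have := h.2.1; omega
    have hA : ¬ ((0 ≤ r ∧ r < MAX ∧ PySem.List.pyGet? chars r ≠ some '-') ∧
        (0 ≤ l ∧ l < MAX ∧ PySem.List.pyGet? chars l ≠ some '-') ∧
        PySem.List.pyGet? chars l = PySem.List.pyGet? chars r) :=
      fun h => hg ((pvGuard_iff chars MAX l r hlt2).mp h)
    rw [pvALoop, dif_neg hA, pvRad_zero_step chars MAX l r hg]
    ring
  | succ m ih =>
    intro s L r l hlt2 hm
    by_cases hg : pvCond chars MAX l r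
    · have hA := (pvGuard_iff chars MAX l r hlt2).mpr hg
      have hrM := hg.2.1
      rw [pvALoop, dif_pos hA]
      rw [ih (s + (L + 2)) (L + 2) (r + 1) (l - 1) (by omega) (by omega)]
      rw [pvRad_pos_step chars MAX l r hg]
      ring
    · have hA : ¬ ((0 ≤ r ∧ r < MAX ∧ PySem.List.pyGet? chars r ≠ some '-') ∧
          (0 ≤ l ∧ l < MAX ∧ PySem.List.pyGet? chars l ≠ some '-') ∧
          PySem.List.pyGet? chars l = PySem.List.pyGet? chars r) :=
        fun h => hg ((pvGuard_iff chars MAX l r hlt2).mp h)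
      rw [pvALoop, dif_neg hA, pvRad_zero_step chars MAX l r hg]
      ring

lemma foldl_ptwise {α β : Type} (f g : β → α → β) (h : ∀ b a, f b a = g b a) :
    ∀ (l : List α) (b : β), l.foldl f b = l.foldl g b := by
  intro l
  induction l with
  | nil => intro b; rfl
  | cons a t ih => intro b; simp only [List.foldl_cons, h, ih]

lemma pvSumTri (P : Nat) : ∑ k ∈ Finset.range P, (2 * ((k : Int) + 1)) = (P : Int) * (P + 1) := by
  induction P with
  | zero => simp
  | succ P ih => rw [Finset.sum_range_succ, ih]; push_cast; ring

lemma pvSumIte (N : Nat) (p : Int) (h0 : 0 ≤ p) (hN : p ≤ (N : Int)) (c : Int) :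
    ∑ k ∈ Finset.range N, (if (k : Int) + 1 ≤ p then 2 * ((k : Int) + 1) + c else 0) =
      p * (p + 1) + c * p := by
  have hsub : Finset.range p.toNat ⊆ Finset.range N := fun x hx =>
    Finset.mem_range.mpr (by have := Finset.mem_range.mp hx; omega)
  have hstep : ∑ k ∈ Finset.range p.toNat, (if (k : Int) + 1 ≤ p then 2 * ((k : Int) + 1) + c else 0) =
      ∑ k ∈ Finset.range N, (if (k : Int) + 1 ≤ p then 2 * ((k : Int) + 1) + c else 0) :=
    Finset.sum_subset hsub (fun x _ hnx =>
      if_neg (fun hcon => hnx (Finset.mem_range.mpr (by omega))))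
  rw [← hstep]
  have hpos : ∑ k ∈ Finset.range p.toNat, (if (k : Int) + 1 ≤ p then 2 * ((k : Int) + 1) + c else 0) =
      ∑ k ∈ Finset.range p.toNat, (2 * ((k : Int) + 1) + c) :=
    Finset.sum_congr rfl (fun x hx => if_pos (by
      have h1 : x < p.toNat := Finset.mem_range.mp hx
      omega))
  rw [hpos, Finset.sum_add_distrib, pvSumTri, Finset.sum_const, Finset.card_range]
  have hp : ((p.toNat : Nat) : Int) = p := by omega
  simp only [nsmul_eq_mul]
  rw [hp]
  ring

lemma pvFoldSum (b : Int) (f : Int → Int) :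
    ∀ (a : Int), ((PySem.List.pyRange a b 1).map f).sum =
      ∑ i ∈ Finset.range ((b - a).toNat), f (a + (i : Int)) := by
  suffices h : ∀ (M : Nat) (a : Int), (b - a).toNat = M →
      ((PySem.List.pyRange a b 1).map f).sum = ∑ i ∈ Finset.range M, f (a + (i : Int)) by
    intro a; exact h _ a rfl
  intro M
  induction M with
  | zero =>
    intro a hM
    rw [PySem.List.pyRange_one_eq_nil (by omega)]
    simp
  | succ m ih =>
    intro a hM
    rw [PySem.List.pyRange_one_cons (by omega)]
    simp only [List.map_cons, List.sum_cons]
    rw [ih (a + 1) (by omega), Finset.sum_range_succ']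
    have he : ∀ i : Nat, f (a + ((i + 1 : Nat) : Int)) = f ((a + 1) + (i : Int)) := by
      intro i; congr 1; push_cast; ring
    rw [Finset.sum_congr rfl (fun i _ => he i)]
    norm_num [add_comm]

lemma pvSumExtend (N r : Nat) (hr : r ≤ N) (f : Nat → Int) :
    ∑ l ∈ Finset.range r, f l = ∑ l ∈ Finset.range N, (if l < r then f l else 0) := by
  have hsub : Finset.range r ⊆ Finset.range N := fun x hx =>
    Finset.mem_range.mpr (by have := Finset.mem_range.mp hx; omega)
  have h1 : ∑ l ∈ Finset.range r, (if l < r then f l else 0) =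
      ∑ l ∈ Finset.range N, (if l < r then f l else 0) :=
    Finset.sum_subset hsub (fun x _ hnx =>
      if_neg (fun hcon => hnx (Finset.mem_range.mpr hcon)))
  rw [← h1]
  exact Finset.sum_congr rfl (fun x hx => (if_pos (Finset.mem_range.mp hx)).symm)

-- the palindrome-and-clean-half test B performs on the substring row[l:r+1]
abbrev pvPalP (cs : List Char) (l r : Nat) : Prop :=
  (PySem.List.slice cs (some (l : Int)) (some ((r : Int) + 1))).reverse =
      PySem.List.slice cs (some (l : Int)) (some ((r : Int) + 1)) ∧
    '-' ∉ (PySem.List.slice cs (some (l : Int)) (some ((r : Int) + 1))).take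
        ((PySem.List.slice cs (some (l : Int)) (some ((r : Int) + 1))).length / 2)

lemma pvPalP_iff (cs : List Char) (l r : Nat) (hlr : l < r) (hr : r < cs.length) :
    pvPalP cs l r ↔ pvGood cs (cs.length : Int) (l : Int) (r : Int) :=
  pvPal_link cs l r hlr hr

lemma pvEvenCond (cs : List Char) (i k : Nat)
    (hc : (k : Int) + 1 ≤ pvRad cs (cs.length : Int) 0 (i : Int) ((i : Int) + 1)) :
    k ≤ i ∧ i + k + 1 < cs.length ∧ pvPalP cs (i - k) (i + k + 1) := by
  have hlink := pvEven_link cs (cs.length : Int) ((i : Int) + 1) ((k : Int) + 1) (by omega)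
  rw [show (i : Int) + 1 - 1 = (i : Int) by ring,
    show (i : Int) + 1 - ((k : Int) + 1) = (i : Int) - (k : Int) by ring,
    show (i : Int) + 1 + ((k : Int) + 1) - 1 = (i : Int) + (k : Int) + 1 by ring] at hlink
  have hG := hlink.mp hc
  have h0 : 0 ≤ (i : Int) - (k : Int) := hG.1
  have hrn : (i : Int) + (k : Int) + 1 < (cs.length : Int) := hG.2.2.1
  have hki : k ≤ i := by omega
  have hN : i + k + 1 < cs.length := by omega
  refine ⟨hki, hN, ?_⟩
  rw [pvPalP_iff cs (i - k) (i + k + 1) (by omega) hN]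
  have e1 : ((i - k : Nat) : Int) = (i : Int) - (k : Int) := by omega
  have e2 : ((i + k + 1 : Nat) : Int) = (i : Int) + (k : Int) + 1 := by push_cast; ring
  rw [e1, e2]
  exact hG

lemma pvEvenCond' (cs : List Char) (i k : Nat) (hki : k ≤ i) (hN : i + k + 1 < cs.length)
    (hp : pvPalP cs (i - k) (i + k + 1)) :
    (k : Int) + 1 ≤ pvRad cs (cs.length : Int) 0 (i : Int) ((i : Int) + 1) := by
  have hG := (pvPalP_iff cs (i - k) (i + k + 1) (by omega) hN).mp hp
  have e1 : ((i - k : Nat) : Int) = (i : Int) - (k : Int) := by omega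
  have e2 : ((i + k + 1 : Nat) : Int) = (i : Int) + (k : Int) + 1 := by push_cast; ring
  rw [e1, e2] at hG
  have hlink := pvEven_link cs (cs.length : Int) ((i : Int) + 1) ((k : Int) + 1) (by omega)
  rw [show (i : Int) + 1 - 1 = (i : Int) by ring,
    show (i : Int) + 1 - ((k : Int) + 1) = (i : Int) - (k : Int) by ring,
    show (i : Int) + 1 + ((k : Int) + 1) - 1 = (i : Int) + (k : Int) + 1 by ring] at hlink
  exact hlink.mpr hG

lemma pvOddCond (cs : List Char) (i k : Nat)
    (hc : (k : Int) + 1 ≤ pvRad cs (cs.length : Int) 0 (i : Int) ((i : Int) + 2)) :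
    k ≤ i ∧ i + k + 2 < cs.length ∧ pvPalP cs (i - k) (i + k + 2) := by
  have hlink := pvOdd_link cs (cs.length : Int) ((i : Int) + 1) ((k : Int) + 1) (by omega)
  rw [show (i : Int) + 1 - 1 = (i : Int) by ring,
    show (i : Int) + 1 + 1 = (i : Int) + 2 by ring,
    show (i : Int) + 1 - ((k : Int) + 1) = (i : Int) - (k : Int) by ring,
    show (i : Int) + 1 + ((k : Int) + 1) = (i : Int) + (k : Int) + 2 by ring] at hlink
  have hG := hlink.mp hc
  have h0 : 0 ≤ (i : Int) - (k : Int) := hG.1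
  have hrn : (i : Int) + (k : Int) + 2 < (cs.length : Int) := hG.2.2.1
  have hki : k ≤ i := by omega
  have hN : i + k + 2 < cs.length := by omega
  refine ⟨hki, hN, ?_⟩
  rw [pvPalP_iff cs (i - k) (i + k + 2) (by omega) hN]
  have e1 : ((i - k : Nat) : Int) = (i : Int) - (k : Int) := by omega
  have e2 : ((i + k + 2 : Nat) : Int) = (i : Int) + (k : Int) + 2 := by push_cast; ring
  rw [e1, e2]
  exact hG

lemma pvOddCond' (cs : List Char) (i k : Nat) (hki : k ≤ i) (hN : i + k + 2 < cs.length)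
    (hp : pvPalP cs (i - k) (i + k + 2)) :
    (k : Int) + 1 ≤ pvRad cs (cs.length : Int) 0 (i : Int) ((i : Int) + 2) := by
  have hG := (pvPalP_iff cs (i - k) (i + k + 2) (by omega) hN).mp hp
  have e1 : ((i - k : Nat) : Int) = (i : Int) - (k : Int) := by omega
  have e2 : ((i + k + 2 : Nat) : Int) = (i : Int) + (k : Int) + 2 := by push_cast; ring
  rw [e1, e2] at hG
  have hlink := pvOdd_link cs (cs.length : Int) ((i : Int) + 1) ((k : Int) + 1) (by omega)
  rw [show (i : Int) + 1 - 1 = (i : Int) by ring,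
    show (i : Int) + 1 + 1 = (i : Int) + 2 by ring,
    show (i : Int) + 1 - ((k : Int) + 1) = (i : Int) - (k : Int) by ring,
    show (i : Int) + 1 + ((k : Int) + 1) = (i : Int) + (k : Int) + 2 by ring] at hlink
  exact hlink.mpr hG

lemma pvBijEven (cs : List Char) :
    ∑ ik ∈ ((Finset.range (cs.length - 1)) ×ˢ (Finset.range cs.length)).filter
      (fun ik => (ik.2 : Int) + 1 ≤ pvRad cs (cs.length : Int) 0 (ik.1 : Int) ((ik.1 : Int) + 1)),
      (2 * ((ik.2 : Int) + 1)) =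
    ∑ rl ∈ ((Finset.range cs.length) ×ˢ (Finset.range cs.length)).filter
      (fun rl => (rl.2 < rl.1 ∧ pvPalP cs rl.2 rl.1) ∧ (rl.1 + rl.2) % 2 = 1),
      ((PySem.List.slice cs (some (rl.2 : Int)) (some ((rl.1 : Int) + 1))).length : Int) := by
  apply Finset.sum_nbij' (i := fun ik => (ik.1 + ik.2 + 1, ik.1 - ik.2))
    (j := fun rl => ((rl.1 + rl.2 - 1) / 2, (rl.1 - rl.2 - 1) / 2))
  · rintro ⟨i, k⟩ ha
    simp only [Finset.mem_filter, Finset.mem_product, Finset.mem_range] at ha ⊢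
    obtain ⟨⟨hi, hk⟩, hc⟩ := ha
    obtain ⟨hki, hN, hp⟩ := pvEvenCond cs i k hc
    exact ⟨⟨by omega, by omega⟩, ⟨by omega, hp⟩, by omega⟩
  · rintro ⟨r, l⟩ hb
    simp only [Finset.mem_filter, Finset.mem_product, Finset.mem_range] at hb ⊢
    obtain ⟨⟨hrN, hlN⟩, ⟨hlr, hp⟩, hpar⟩ := hb
    have el : (r + l - 1) / 2 - (r - l - 1) / 2 = l := by omega
    have er : (r + l - 1) / 2 + (r - l - 1) / 2 + 1 = r := by omega
    refine ⟨⟨by omega, by omega⟩, ?_⟩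
    apply pvEvenCond' cs ((r + l - 1) / 2) ((r - l - 1) / 2) (by omega) (by omega)
    rw [el, er]
    exact hp
  · rintro ⟨i, k⟩ ha
    simp only [Finset.mem_filter, Finset.mem_product, Finset.mem_range] at ha
    obtain ⟨⟨hi, hk⟩, hc⟩ := ha
    have hki := (pvEvenCond cs i k hc).1
    simp only [Prod.mk.injEq]
    omega
  · rintro ⟨r, l⟩ hb
    simp only [Finset.mem_filter, Finset.mem_product, Finset.mem_range] at hb
    obtain ⟨⟨hrN, hlN⟩, ⟨hlr, hp⟩, hpar⟩ := hb
    simp only [Prod.mk.injEq]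
    omega
  · rintro ⟨i, k⟩ ha
    simp only [Finset.mem_filter, Finset.mem_product, Finset.mem_range] at ha
    obtain ⟨⟨hi, hk⟩, hc⟩ := ha
    obtain ⟨hki, hN, hp⟩ := pvEvenCond cs i k hc
    rw [pvSlice_len cs (i - k) (i + k + 1) (by omega) hN]
    omega

lemma pvBijOdd (cs : List Char) :
    ∑ ik ∈ ((Finset.range (cs.length - 1)) ×ˢ (Finset.range cs.length)).filter
      (fun ik => (ik.2 : Int) + 1 ≤ pvRad cs (cs.length : Int) 0 (ik.1 : Int) ((ik.1 : Int) + 2)),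
      (2 * ((ik.2 : Int) + 1) + 1) =
    ∑ rl ∈ ((Finset.range cs.length) ×ˢ (Finset.range cs.length)).filter
      (fun rl => (rl.2 < rl.1 ∧ pvPalP cs rl.2 rl.1) ∧ ¬ (rl.1 + rl.2) % 2 = 1),
      ((PySem.List.slice cs (some (rl.2 : Int)) (some ((rl.1 : Int) + 1))).length : Int) := by
  apply Finset.sum_nbij' (i := fun ik => (ik.1 + ik.2 + 2, ik.1 - ik.2))
    (j := fun rl => ((rl.1 + rl.2 - 2) / 2, (rl.1 - rl.2 - 2) / 2))
  · rintro ⟨i, k⟩ ha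
    simp only [Finset.mem_filter, Finset.mem_product, Finset.mem_range] at ha ⊢
    obtain ⟨⟨hi, hk⟩, hc⟩ := ha
    obtain ⟨hki, hN, hp⟩ := pvOddCond cs i k hc
    exact ⟨⟨by omega, by omega⟩, ⟨by omega, hp⟩, by omega⟩
  · rintro ⟨r, l⟩ hb
    simp only [Finset.mem_filter, Finset.mem_product, Finset.mem_range] at hb ⊢
    obtain ⟨⟨hrN, hlN⟩, ⟨hlr, hp⟩, hpar⟩ := hb
    have el : (r + l - 2) / 2 - (r - l - 2) / 2 = l := by omega
    have er : (r + l - 2) / 2 + (r - l - 2) / 2 + 2 = r := by omega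
    refine ⟨⟨by omega, by omega⟩, ?_⟩
    apply pvOddCond' cs ((r + l - 2) / 2) ((r - l - 2) / 2) (by omega) (by omega)
    rw [el, er]
    exact hp
  · rintro ⟨i, k⟩ ha
    simp only [Finset.mem_filter, Finset.mem_product, Finset.mem_range] at ha
    obtain ⟨⟨hi, hk⟩, hc⟩ := ha
    have hki := (pvOddCond cs i k hc).1
    simp only [Prod.mk.injEq]
    omega
  · rintro ⟨r, l⟩ hb
    simp only [Finset.mem_filter, Finset.mem_product, Finset.mem_range] at hb
    obtain ⟨⟨hrN, hlN⟩, ⟨hlr, hp⟩, hpar⟩ := hb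
    simp only [Prod.mk.injEq]
    omega
  · rintro ⟨i, k⟩ ha
    simp only [Finset.mem_filter, Finset.mem_product, Finset.mem_range] at ha
    obtain ⟨⟨hi, hk⟩, hc⟩ := ha
    obtain ⟨hki, hN, hp⟩ := pvOddCond cs i k hc
    rw [pvSlice_len cs (i - k) (i + k + 2) (by omega) hN]
    omega

lemma pvASide (cs : List Char) :
    (PySem.List.pyRange 1 (cs.length : Int) 1).foldl
      (fun score ind =>
        (score + pvALoop cs (cs.length : Int) 0 0 ind (ind - 1)) +
          pvALoop cs (cs.length : Int) 0 1 (ind + 1) (ind - 1)) 0 =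
    (∑ ik ∈ ((Finset.range (cs.length - 1)) ×ˢ (Finset.range cs.length)).filter
      (fun ik => (ik.2 : Int) + 1 ≤ pvRad cs (cs.length : Int) 0 (ik.1 : Int) ((ik.1 : Int) + 1)),
      (2 * ((ik.2 : Int) + 1))) +
    (∑ ik ∈ ((Finset.range (cs.length - 1)) ×ˢ (Finset.range cs.length)).filter
      (fun ik => (ik.2 : Int) + 1 ≤ pvRad cs (cs.length : Int) 0 (ik.1 : Int) ((ik.1 : Int) + 2)),
      (2 * ((ik.2 : Int) + 1) + 1)) := by
  have hfg : ∀ (b a : Int),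
      ((b + pvALoop cs (cs.length : Int) 0 0 a (a - 1)) + pvALoop cs (cs.length : Int) 0 1 (a + 1) (a - 1)) =
      (b + (pvRad cs (cs.length : Int) 0 (a - 1) a * (pvRad cs (cs.length : Int) 0 (a - 1) a + 1) +
            pvRad cs (cs.length : Int) 0 (a - 1) (a + 1) * (pvRad cs (cs.length : Int) 0 (a - 1) (a + 1) + 2))) := by
    intro b a
    rw [pvALoop_eq cs (cs.length : Int) 0 0 a (a - 1) (by omega),
      pvALoop_eq cs (cs.length : Int) 0 1 (a + 1) (a - 1) (by omega)]
    ring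
  rw [foldl_ptwise _ _ hfg, PySem.List.foldl_add, zero_add, pvFoldSum,
    show ((cs.length : Int) - 1).toNat = cs.length - 1 from by omega]
  have hstep : ∀ i ∈ Finset.range (cs.length - 1),
      (pvRad cs (cs.length : Int) 0 (1 + (i : Int) - 1) (1 + (i : Int)) *
         (pvRad cs (cs.length : Int) 0 (1 + (i : Int) - 1) (1 + (i : Int)) + 1) +
       pvRad cs (cs.length : Int) 0 (1 + (i : Int) - 1) (1 + (i : Int) + 1) *
         (pvRad cs (cs.length : Int) 0 (1 + (i : Int) - 1) (1 + (i : Int) + 1) + 2)) =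
      ((∑ k ∈ Finset.range cs.length,
          if (k : Int) + 1 ≤ pvRad cs (cs.length : Int) 0 (i : Int) ((i : Int) + 1) then 2 * ((k : Int) + 1) + 0 else 0) +
       (∑ k ∈ Finset.range cs.length,
          if (k : Int) + 1 ≤ pvRad cs (cs.length : Int) 0 (i : Int) ((i : Int) + 2) then 2 * ((k : Int) + 1) + 1 else 0)) := by
    intro i hi
    simp only [Finset.mem_range] at hi
    have e1 : (1 : Int) + (i : Int) - 1 = (i : Int) := by ring
    have e2 : (1 : Int) + (i : Int) + 1 = (i : Int) + 2 := by ring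
    have e3 : (1 : Int) + (i : Int) = (i : Int) + 1 := by ring
    rw [e1, e2, e3]
    have hp0 := pvRad_nonneg cs (cs.length : Int) (i : Int) ((i : Int) + 1)
    have hq0 := pvRad_nonneg cs (cs.length : Int) (i : Int) ((i : Int) + 2)
    have hpN : pvRad cs (cs.length : Int) 0 (i : Int) ((i : Int) + 1) ≤ (cs.length : Int) := by
      have := pvRad_le cs (cs.length : Int) (i : Int) ((i : Int) + 1) (by omega)
      omega
    have hqN : pvRad cs (cs.length : Int) 0 (i : Int) ((i : Int) + 2) ≤ (cs.length : Int) := by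
      have := pvRad_le cs (cs.length : Int) (i : Int) ((i : Int) + 2) (by omega)
      omega
    rw [pvSumIte cs.length _ hp0 hpN 0, pvSumIte cs.length _ hq0 hqN 1]
    ring
  rw [Finset.sum_congr rfl hstep, Finset.sum_add_distrib]
  simp only [add_zero]
  rw [← Finset.sum_product', ← Finset.sum_product', ← Finset.sum_filter, ← Finset.sum_filter]

lemma pvBSide (cs : List Char) :
    (PySem.List.pyRange 0 (cs.length : Int) 1).foldl
      (fun total r =>
        (PySem.List.pyRange 0 r 1).foldl
          (fun total l =>
            if (PySem.List.slice cs (some l) (some (r + 1))).reverse = PySem.List.slice cs (some l) (some (r + 1)) ∧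
                '-' ∉ (PySem.List.slice cs (some l) (some (r + 1))).take ((PySem.List.slice cs (some l) (some (r + 1))).length / 2)
            then total + ((PySem.List.slice cs (some l) (some (r + 1))).length : Int)
            else total)
          total) 0 =
    ∑ rl ∈ ((Finset.range cs.length) ×ˢ (Finset.range cs.length)).filter (fun rl => rl.2 < rl.1 ∧ pvPalP cs rl.2 rl.1),
      ((PySem.List.slice cs (some (rl.2 : Int)) (some ((rl.1 : Int) + 1))).length : Int) := by
  have hinner : ∀ (b r : Int),
      (PySem.List.pyRange 0 r 1).foldl
        (fun total l =>
          if (PySem.List.slice cs (some l) (some (r + 1))).reverse = PySem.List.slice cs (some l) (some (r + 1)) ∧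
              '-' ∉ (PySem.List.slice cs (some l) (some (r + 1))).take ((PySem.List.slice cs (some l) (some (r + 1))).length / 2)
          then total + ((PySem.List.slice cs (some l) (some (r + 1))).length : Int)
          else total) b =
      b + ((PySem.List.pyRange 0 r 1).map
        (fun l =>
          if (PySem.List.slice cs (some l) (some (r + 1))).reverse = PySem.List.slice cs (some l) (some (r + 1)) ∧
              '-' ∉ (PySem.List.slice cs (some l) (some (r + 1))).take ((PySem.List.slice cs (some l) (some (r + 1))).length / 2)
          then ((PySem.List.slice cs (some l) (some (r + 1))).length : Int)
          else 0)).sum := by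
    intro b r
    have hpt : ∀ (total l : Int),
        (if (PySem.List.slice cs (some l) (some (r + 1))).reverse = PySem.List.slice cs (some l) (some (r + 1)) ∧
              '-' ∉ (PySem.List.slice cs (some l) (some (r + 1))).take ((PySem.List.slice cs (some l) (some (r + 1))).length / 2)
          then total + ((PySem.List.slice cs (some l) (some (r + 1))).length : Int)
          else total) =
        total + (if (PySem.List.slice cs (some l) (some (r + 1))).reverse = PySem.List.slice cs (some l) (some (r + 1)) ∧
              '-' ∉ (PySem.List.slice cs (some l) (some (r + 1))).take ((PySem.List.slice cs (some l) (some (r + 1))).length / 2)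
          then ((PySem.List.slice cs (some l) (some (r + 1))).length : Int)
          else 0) := by
      intro total l
      split_ifs <;> ring
    rw [foldl_ptwise _ _ hpt]
    exact PySem.List.foldl_add _ _ _
  rw [foldl_ptwise _ _ hinner, PySem.List.foldl_add, zero_add, pvFoldSum,
    show ((cs.length : Int) - 0).toNat = cs.length from by omega]
  simp only [zero_add]
  have hstep : ∀ r ∈ Finset.range cs.length,
      ((PySem.List.pyRange 0 (r : Int) 1).map
        (fun l =>
          if (PySem.List.slice cs (some l) (some ((r : Int) + 1))).reverse = PySem.List.slice cs (some l) (some ((r : Int) + 1)) ∧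
              '-' ∉ (PySem.List.slice cs (some l) (some ((r : Int) + 1))).take ((PySem.List.slice cs (some l) (some ((r : Int) + 1))).length / 2)
          then ((PySem.List.slice cs (some l) (some ((r : Int) + 1))).length : Int)
          else 0)).sum =
      ∑ l ∈ Finset.range cs.length,
        (if l < r ∧ pvPalP cs l r
         then ((PySem.List.slice cs (some (l : Int)) (some ((r : Int) + 1))).length : Int)
         else 0) := by
    intro r hr
    simp only [Finset.mem_range] at hr
    rw [pvFoldSum, show ((r : Int) - 0).toNat = r from by omega]
    simp only [zero_add]
    rw [pvSumExtend cs.length r (by omega)]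
    apply Finset.sum_congr rfl
    intro l hl
    by_cases h1 : l < r
    · by_cases h2 : pvPalP cs l r
      · rw [if_pos h1, if_pos h2, if_pos ⟨h1, h2⟩]
      · rw [if_pos h1, if_neg h2, if_neg (fun h => h2 h.2)]
    · rw [if_neg h1, if_neg (fun h => h1 h.1)]
  rw [Finset.sum_congr rfl hstep, ← Finset.sum_product', ← Finset.sum_filter]

lemma pvMain (cs : List Char) :
    (PySem.List.pyRange 1 (cs.length : Int) 1).foldl
      (fun score ind =>
        (score + pvALoop cs (cs.length : Int) 0 0 ind (ind - 1)) +
          pvALoop cs (cs.length : Int) 0 1 (ind + 1) (ind - 1)) 0 =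
    (PySem.List.pyRange 0 (cs.length : Int) 1).foldl
      (fun total r =>
        (PySem.List.pyRange 0 r 1).foldl
          (fun total l =>
            if (PySem.List.slice cs (some l) (some (r + 1))).reverse = PySem.List.slice cs (some l) (some (r + 1)) ∧
                '-' ∉ (PySem.List.slice cs (some l) (some (r + 1))).take ((PySem.List.slice cs (some l) (some (r + 1))).length / 2)
            then total + ((PySem.List.slice cs (some l) (some (r + 1))).length : Int)
            else total)
          total) 0 := by
  rw [pvASide cs, pvBSide cs, pvBijEven cs, pvBijOdd cs]
  have h := Finset.sum_filter_add_sum_filter_not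
    (((Finset.range cs.length) ×ˢ (Finset.range cs.length)).filter
      (fun rl => rl.2 < rl.1 ∧ pvPalP cs rl.2 rl.1))
    (fun rl => (rl.1 + rl.2) % 2 = 1)
    (fun rl => ((PySem.List.slice cs (some (rl.2 : Int)) (some ((rl.1 : Int) + 1))).length : Int))
  rw [Finset.filter_filter, Finset.filter_filter] at h
  exact h

-- ===== VERDICT (by name: the statement is the Claim_ definition above) =====
theorem scoreHelp_spec : Claim_equal_scoreHelp := by
  intro row _
  unfold Spec_scoreHelp scoreHelp scoreHelp_alt
  exact pvMain row.toList
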